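-- pv_equiv track=rewrite | github.com/AkwasiAI/celery-worker-project | portfolio_generator/modules/data_extraction.py | infer_region_from_asset
-- ===== SOURCE A (Python) =====
-- def infer_region_from_asset(asset_name):
--     """Infer the region an asset belongs to based on its name.
--
--     Args:
--         asset_name: The name of the asset
--
--     Returns:
--         str: The inferred region or "Global" if unknown
--     """
--     # Check for regional indicators in asset name
--     if any(keyword in asset_name.lower() for keyword in ["us", "america", "nyse", "nasdaq"]):
--         return "North America"
--     elif any(keyword in asset_name.lower() for keyword in ["eu", "euro", "german", "france", "uk", "britain"]):
--         return "Europe"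
--     elif any(keyword in asset_name.lower() for keyword in ["china", "japan", "asia", "hong kong", "singapore"]):
--         return "Asia"
--     elif any(keyword in asset_name.lower() for keyword in ["brazil", "latam", "mexico"]):
--         return "Latin America"
--     elif any(keyword in asset_name.lower() for keyword in ["africa", "south africa", "nigeria"]):
--         return "Africa"
--     else:
--         return "Global"
-- ===== SOURCE B (Python) =====
-- # Single left-to-right scan of the lowered name: at every position, record which
-- # regions have a keyword starting there (flat keyword->region table), then return
-- # the highest-priority matched region.
-- KEYWORD_REGION = [
--     ("us", "North America"), ("america", "North America"),
--     ("nyse", "North America"), ("nasdaq", "North America"),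
--     ("eu", "Europe"), ("euro", "Europe"), ("german", "Europe"),
--     ("france", "Europe"), ("uk", "Europe"), ("britain", "Europe"),
--     ("china", "Asia"), ("japan", "Asia"), ("asia", "Asia"),
--     ("hong kong", "Asia"), ("singapore", "Asia"),
--     ("brazil", "Latin America"), ("latam", "Latin America"), ("mexico", "Latin America"),
--     ("africa", "Africa"), ("south africa", "Africa"), ("nigeria", "Africa"),
-- ]
-- REGION_PRIORITY = ["North America", "Europe", "Asia", "Latin America", "Africa"]
--
-- def infer_region_from_asset(asset_name):
--     """Infer the region an asset belongs to based on its name."""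
--     name = asset_name.lower()
--     matched = set()
--     for i in range(len(name)):
--         for kw, region in KEYWORD_REGION:
--             if name.startswith(kw, i):
--                 matched.add(region)
--     for region in REGION_PRIORITY:
--         if region in matched:
--             return region
--     return "Global"
-- ===== Notes on version B (the rewrite author's own statement) =====
-- stated objective: alternative
-- what changed: Instead of five ordered any-substring membership branches, B makes one left-to-right scan over the lowered name collecting into a set every region whose keyword starts at the current position, then returns the first matched region in priority order (Global if none).
import Mathlib
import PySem

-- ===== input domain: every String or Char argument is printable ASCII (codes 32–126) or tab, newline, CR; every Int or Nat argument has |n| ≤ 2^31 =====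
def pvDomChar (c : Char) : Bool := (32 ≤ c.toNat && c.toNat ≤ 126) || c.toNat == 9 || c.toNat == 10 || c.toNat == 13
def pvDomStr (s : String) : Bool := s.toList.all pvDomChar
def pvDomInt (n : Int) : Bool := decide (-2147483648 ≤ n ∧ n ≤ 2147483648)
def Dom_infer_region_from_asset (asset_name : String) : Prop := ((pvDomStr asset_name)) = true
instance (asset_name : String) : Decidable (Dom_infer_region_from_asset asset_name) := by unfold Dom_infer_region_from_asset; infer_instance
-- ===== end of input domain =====

-- B replaces A's five ordered any-substring branches by one positional scan of the lowered
-- name collecting matched regions into a set, then a priority-order pick (alternative; same cost).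

-- ===== PORT A =====
def infer_region_from_asset (asset_name : String) : String :=
  if ["us", "america", "nyse", "nasdaq"].any
      (fun kw => PySem.Str.isIn kw (PySem.Str.lower asset_name)) then "North America"
  else if ["eu", "euro", "german", "france", "uk", "britain"].any
      (fun kw => PySem.Str.isIn kw (PySem.Str.lower asset_name)) then "Europe"
  else if ["china", "japan", "asia", "hong kong", "singapore"].any
      (fun kw => PySem.Str.isIn kw (PySem.Str.lower asset_name)) then "Asia"
  else if ["brazil", "latam", "mexico"].any
      (fun kw => PySem.Str.isIn kw (PySem.Str.lower asset_name)) then "Latin America"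
  else if ["africa", "south africa", "nigeria"].any
      (fun kw => PySem.Str.isIn kw (PySem.Str.lower asset_name)) then "Africa"
  else "Global"

-- ===== PORT B =====
def pvKeywordRegion : List (String × String) :=
  [("us", "North America"), ("america", "North America"),
   ("nyse", "North America"), ("nasdaq", "North America"),
   ("eu", "Europe"), ("euro", "Europe"), ("german", "Europe"),
   ("france", "Europe"), ("uk", "Europe"), ("britain", "Europe"),
   ("china", "Asia"), ("japan", "Asia"), ("asia", "Asia"),
   ("hong kong", "Asia"), ("singapore", "Asia"),
   ("brazil", "Latin America"), ("latam", "Latin America"), ("mexico", "Latin America"),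
   ("africa", "Africa"), ("south africa", "Africa"), ("nigeria", "Africa")]

def pvRegionPriority : List String :=
  ["North America", "Europe", "Asia", "Latin America", "Africa"]

-- one position of the scan: name.startswith(kw, i) on the current suffix
def pvMarkAt (t : List Char) (m : PySem.Set String) : PySem.Set String :=
  pvKeywordRegion.foldl
    (fun acc kr => if kr.1.toList.isPrefixOf t then PySem.Set.add acc kr.2 else acc) m

def pvScanSet : List Char → PySem.Set String → PySem.Set String
  | [], m => m
  | c :: rest, m => pvScanSet rest (pvMarkAt (c :: rest) m)

def pvPick : List String → PySem.Set String → String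
  | [], _ => "Global"
  | r :: rest, m => if PySem.Set.contains m r then r else pvPick rest m

def infer_region_from_asset_alt (asset_name : String) : String :=
  pvPick pvRegionPriority (pvScanSet (PySem.Str.lower asset_name).toList PySem.Set.empty)

-- ===== PRECONDITION & SPEC =====
def Spec_infer_region_from_asset (asset_name : String) (out : String) : Prop := out = infer_region_from_asset_alt asset_name
instance (asset_name : String) (out : String) : Decidable (Spec_infer_region_from_asset asset_name out) := by unfold Spec_infer_region_from_asset; infer_instance

-- ===== CLAIM =====
def Claim_equal_infer_region_from_asset : Prop := ∀ (asset_name : String), Dom_infer_region_from_asset asset_name → Spec_infer_region_from_asset asset_name (infer_region_from_asset asset_name)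

-- ===== LEMMAS AND PROOFS =====

theorem mem_foldl_mark (table : List (String × String)) (t : List Char)
    (m : PySem.Set String) (r : String) :
    r ∈ table.foldl
      (fun acc kr => if kr.1.toList.isPrefixOf t then PySem.Set.add acc kr.2 else acc) m ↔
    r ∈ m ∨ ∃ p ∈ table, p.1.toList <+: t ∧ p.2 = r := by
  induction table generalizing m with
  | nil => simp
  | cons p rest ih =>
    simp only [List.foldl_cons, ih, List.mem_cons]
    by_cases h : p.1.toList.isPrefixOf t = true
    · simp only [h, if_pos, PySem.Set.mem_add]
      rw [List.isPrefixOf_iff_prefix] at h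
      constructor
      · rintro ((hm | he) | ⟨q, hq, hpre, hr⟩)
        · exact Or.inl hm
        · exact Or.inr ⟨p, Or.inl rfl, h, he.symm⟩
        · exact Or.inr ⟨q, Or.inr hq, hpre, hr⟩
      · rintro (hm | ⟨q, (rfl | hq), hpre, hr⟩)
        · exact Or.inl (Or.inl hm)
        · exact Or.inl (Or.inr hr.symm)
        · exact Or.inr ⟨q, hq, hpre, hr⟩
    · simp only [h, if_neg, Bool.false_eq_true, not_false_iff]
      rw [Bool.not_eq_true, ← Bool.not_eq_true, List.isPrefixOf_iff_prefix] at h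
      constructor
      · rintro (hm | ⟨q, hq, hpre, hr⟩)
        · exact Or.inl hm
        · exact Or.inr ⟨q, Or.inr hq, hpre, hr⟩
      · rintro (hm | ⟨q, (rfl | hq), hpre, hr⟩)
        · exact Or.inl hm
        · exact absurd hpre h
        · exact Or.inr ⟨q, hq, hpre, hr⟩

theorem mem_pvMarkAt (t : List Char) (m : PySem.Set String) (r : String) :
    r ∈ pvMarkAt t m ↔ r ∈ m ∨ ∃ p ∈ pvKeywordRegion, p.1.toList <+: t ∧ p.2 = r := by
  unfold pvMarkAt
  exact mem_foldl_mark _ t m r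

theorem pvKeys_ne_nil : ∀ p ∈ pvKeywordRegion, p.1.toList ≠ [] := by
  decide

theorem mem_pvScanSet (l : List Char) (m : PySem.Set String) (r : String) :
    r ∈ pvScanSet l m ↔ r ∈ m ∨ ∃ p ∈ pvKeywordRegion, p.1.toList <:+: l ∧ p.2 = r := by
  induction l generalizing m with
  | nil =>
    simp only [pvScanSet]
    constructor
    · exact Or.inl
    · rintro (hm | ⟨q, hq, hinf, _⟩)
      · exact hm
      · exact absurd (List.infix_nil.mp hinf) (pvKeys_ne_nil q hq)
  | cons c rest ih =>
    simp only [pvScanSet, ih, mem_pvMarkAt]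
    constructor
    · rintro ((hm | ⟨q, hq, hpre, hr⟩) | ⟨q, hq, hinf, hr⟩)
      · exact Or.inl hm
      · exact Or.inr ⟨q, hq, List.infix_cons_iff.mpr (Or.inl hpre), hr⟩
      · exact Or.inr ⟨q, hq, List.infix_cons_iff.mpr (Or.inr hinf), hr⟩
    · rintro (hm | ⟨q, hq, hinf, hr⟩)
      · exact Or.inl (Or.inl hm)
      · rcases List.infix_cons_iff.mp hinf with hpre | hinf'
        · exact Or.inl (Or.inr ⟨q, hq, hpre, hr⟩)
        · exact Or.inr ⟨q, hq, hinf', hr⟩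

theorem contains_scan_iff (L : List Char) (r : String) :
    PySem.Set.contains (pvScanSet L PySem.Set.empty) r = true ↔
      ∃ p ∈ pvKeywordRegion, p.1.toList <:+: L ∧ p.2 = r := by
  rw [PySem.Set.contains_iff, mem_pvScanSet]
  simp [PySem.Set.empty]

-- ===== VERDICT =====
theorem infer_region_from_asset_spec : Claim_equal_infer_region_from_asset := by
  intro s _
  unfold Spec_infer_region_from_asset infer_region_from_asset infer_region_from_asset_alt
  set L : List Char := (PySem.Str.lower s).toList with hL
  have key : ∀ K : List String, ∀ r : String,
      (∀ kw ∈ K, (kw, r) ∈ pvKeywordRegion) →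
      (∀ p ∈ pvKeywordRegion, p.2 = r → p.1 ∈ K) →
      (K.any (fun kw => PySem.Str.isIn kw (PySem.Str.lower s)) =
        PySem.Set.contains (pvScanSet L PySem.Set.empty) r) := by
    intro K r hK hK2
    rw [Bool.eq_iff_iff, List.any_eq_true, contains_scan_iff]
    constructor
    · rintro ⟨kw, hkw, hin⟩
      refine ⟨(kw, r), hK kw hkw, ?_, rfl⟩
      simpa [PySem.Chars.isIn_iff_infix, hL] using hin
    · rintro ⟨p, hp, hinf, hr⟩
      refine ⟨p.1, hK2 p hp hr, ?_⟩
      simpa [PySem.Chars.isIn_iff_infix, hL] using hinf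
  rw [key ["us", "america", "nyse", "nasdaq"] "North America" (by decide) (by decide),
      key ["eu", "euro", "german", "france", "uk", "britain"] "Europe" (by decide) (by decide),
      key ["china", "japan", "asia", "hong kong", "singapore"] "Asia" (by decide) (by decide),
      key ["brazil", "latam", "mexico"] "Latin America" (by decide) (by decide),
      key ["africa", "south africa", "nigeria"] "Africa" (by decide) (by decide)]
  simp only [pvRegionPriority, pvPick]
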